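-- pv_equiv track=rewrite | github.com/Pollock-Nag/play-with-pyhton | BracU/Lab 6/task8.py | show_palindrome
-- ===== SOURCE A (Python) =====
-- def show_palindrome(num):
--     ans=""
--     for i in range(1,num+1):
--         ans+=str(i)
--         ans+=" "
--     for i in range(num-1,0,-1):
--         ans+=str(i)
--         ans+=" "
--     return ans
-- ===== SOURCE B (Python) =====
-- def show_palindrome(num):
--     out = []
--     for k in range(1, 2 * num):
--         i = k if k <= num else 2 * num - k
--         out.append(str(i))
--         out.append(" ")
--     return "".join(out)
-- ===== Notes on version B (the rewrite author's own statement) =====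
-- stated objective: alternative
-- what changed: Replaces A's two independent counting loops (up then down) with a single loop over all 2*num-1 output positions, computing each emitted number by the arithmetic reflection formula i = k if k <= num else 2*num - k, and one final join.
import Mathlib
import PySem

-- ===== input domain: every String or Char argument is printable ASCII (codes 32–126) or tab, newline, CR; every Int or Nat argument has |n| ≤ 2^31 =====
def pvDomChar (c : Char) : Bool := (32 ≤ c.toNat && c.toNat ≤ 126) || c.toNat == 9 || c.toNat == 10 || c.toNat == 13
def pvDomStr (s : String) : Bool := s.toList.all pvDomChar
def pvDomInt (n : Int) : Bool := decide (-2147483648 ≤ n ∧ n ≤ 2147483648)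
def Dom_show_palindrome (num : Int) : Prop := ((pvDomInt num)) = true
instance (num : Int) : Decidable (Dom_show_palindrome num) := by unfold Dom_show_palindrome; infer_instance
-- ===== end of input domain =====

-- B replaces A's two counting loops with a single loop over all output positions using the
-- reflection formula i = k if k <= num else 2*num - k, plus one final join; objective: alternative.


-- ===== PORT A =====
def show_palindrome (num : Int) : String :=
  let ans : String := ""
  let ans := (PySem.List.pyRange 1 (num + 1) 1).foldl
    (fun ans i => (ans ++ PySem.Int.toStr i) ++ " ") ans
  let ans := (PySem.List.pyRange (num - 1) 0 (-1)).foldl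
    (fun ans i => (ans ++ PySem.Int.toStr i) ++ " ") ans
  ans

-- ===== PORT B =====
def show_palindrome_alt (num : Int) : String :=
  let out : List String := []
  let out := (PySem.List.pyRange 1 (2 * num) 1).foldl
    (fun out k =>
      let i := if k ≤ num then k else 2 * num - k
      (out ++ [PySem.Int.toStr i]) ++ [" "]) out
  PySem.Str.join "" out

-- ===== PRECONDITION & SPEC =====
def Spec_show_palindrome (num : Int) (out : String) : Prop := out = show_palindrome_alt num
instance (num : Int) (out : String) : Decidable (Spec_show_palindrome num out) := by unfold Spec_show_palindrome; infer_instance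

-- ===== CLAIM (what is proved, stated in full; the proofs are below) =====
def Claim_equal_show_palindrome : Prop := ∀ (num : Int), Dom_show_palindrome num → Spec_show_palindrome num (show_palindrome num)

-- ===== LEMMAS AND PROOFS =====

-- A's string-accumulating loop, at the character-list level
theorem pv_foldl_toList (l : List Int) (acc : String) :
    (l.foldl (fun ans i => (ans ++ PySem.Int.toStr i) ++ " ") acc).toList
      = acc.toList ++ l.flatMap (fun i => PySem.Int.toChars i ++ [' ']) := by
  induction l generalizing acc with
  | nil => simp
  | cons x t ih =>
    simp only [List.foldl_cons, ih, List.flatMap_cons]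
    simp [PySem.Int.toList_toStr]

-- B's list-accumulating loop
theorem pv_foldl_out (num : Int) (l : List Int) (acc : List String) :
    l.foldl (fun out k =>
        let i := if k ≤ num then k else 2 * num - k
        (out ++ [PySem.Int.toStr i]) ++ [" "]) acc
      = acc ++ l.flatMap (fun k =>
          [PySem.Int.toStr (if k ≤ num then k else 2 * num - k), " "]) := by
  induction l generalizing acc with
  | nil => simp
  | cons x t ih =>
    simp only [List.foldl_cons, ih, List.flatMap_cons]
    simp

-- ''.join is flatten
theorem pv_join_empty (parts : List (List Char)) :
    PySem.Chars.join [] parts = parts.flatten := by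
  induction parts with
  | nil => simp [PySem.Chars.join_nil]
  | cons x t ih =>
    cases t with
    | nil => simp [PySem.Chars.join_singleton]
    | cons y u => simpa [PySem.Chars.join_cons_cons] using ih

theorem pv_tok_flatten (num : Int) (l : List Int) :
    (List.map String.toList
        (List.map (fun k => [PySem.Int.toStr (if k ≤ num then k else 2 * num - k), " "]) l).flatten).flatten
      = (List.map (fun k => PySem.Int.toChars (if k ≤ num then k else 2 * num - k) ++ [' ']) l).flatten := by
  induction l with
  | nil => simp
  | cons x t ih =>
    simp only [List.map_cons, List.flatten_cons, List.map_append, List.flatten_append, ih]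
    simp [PySem.Int.toList_toStr]

-- B at the character-list level: one pass over positions 1..2*num-1 with the reflection formula
theorem pv_alt_toList (num : Int) :
    (show_palindrome_alt num).toList
      = (PySem.List.pyRange 1 (2 * num) 1).flatMap
          (fun k => PySem.Int.toChars (if k ≤ num then k else 2 * num - k) ++ [' ']) := by
  simp only [show_palindrome_alt, pv_foldl_out, List.nil_append]
  rw [PySem.Str.toList_join]
  simp only [String.toList_empty, pv_join_empty]
  rw [List.flatMap_def, List.flatMap_def]
  rw [pv_tok_flatten]

-- the reflected second half equals the countdown num-1 .. 1
theorem pv_reflect (num : Int) (h : 1 ≤ num) :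
    (PySem.List.pyRange (num + 1) (2 * num) 1).map (fun k => 2 * num - k)
      = PySem.List.pyRange (num - 1) 0 (-1) := by
  rw [PySem.List.pyRange_one, PySem.List.pyRange_neg_one, List.map_map]
  have he : (2 * num - (num + 1) : Int).toNat = (num - 1 - 0 : Int).toNat := by omega
  rw [he]
  apply List.map_congr_left
  intro k hk
  simp only [List.mem_range] at hk
  simp only [Function.comp_apply]
  omega

-- ===== VERDICT (by name: the statement is the Claim_ definition above) =====
theorem show_palindrome_spec : Claim_equal_show_palindrome := by
  intro num _
  unfold Spec_show_palindrome
  apply String.toList_inj.mp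
  rw [pv_alt_toList]
  simp only [show_palindrome, pv_foldl_toList, String.toList_empty, List.nil_append]
  by_cases h : 1 ≤ num
  · rw [PySem.List.pyRange_one_append 1 (num + 1) (2 * num) (by omega) (by omega),
      List.flatMap_append]
    congr 1
    · apply List.flatMap_congr
      intro k hk
      rw [PySem.List.mem_pyRange_one] at hk
      rw [if_pos (by omega)]
    · rw [← pv_reflect num h, List.flatMap_map]
      apply List.flatMap_congr
      intro k hk
      rw [PySem.List.mem_pyRange_one] at hk
      rw [if_neg (by omega)]
  · rw [PySem.List.pyRange_one_eq_nil (by omega : (2*num : Int) ≤ 1),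
      PySem.List.pyRange_one_eq_nil (by omega : (num + 1 : Int) ≤ 1),
      PySem.List.pyRange_neg_one_eq_nil (by omega : (num - 1 : Int) ≤ 0)]
    simp
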